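-- pv_equiv track=rewrite | github.com/pypi-data/pypi-mirror-357 | packages/mark-mate/mark_mate-0.1.1.tar.gz/mark_mate-0.1.1/src/mark_mate/utils/file_detection.py | _determine_primary_type
-- ===== SOURCE A (Python) =====
-- def _determine_primary_type(
--     category_counts: dict[str, int], detected_projects: list[str]
-- ) -> str:
--     """Determine the primary submission type.
--
--     Args:
--         category_counts: Count of files by category.
--         detected_projects: List of detected project types.
--
--     Returns:
--         Primary submission type.
--     """
--     # Project types take precedence
--     if detected_projects:
--         return detected_projects[0]  # Return first detected project type
--
--     # Otherwise, use file category with highest count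
--     if not category_counts:
--         return "unknown"
--
--     # Prioritize certain categories
--     priority_order = [
--         "jupyter_notebook",
--         "wordpress_backup",
--         "office_document",
--         "source_code",
--         "document",
--         "archive",
--     ]
--
--     for category in priority_order:
--         if category in category_counts and category_counts[category] > 0:
--             return category
--
--     # Return most common category
--     return max(category_counts.items(), key=lambda x: x[1])[0]
-- ===== SOURCE B (Python) =====
-- _PRIORITY_ORDER = [
--     "jupyter_notebook",
--     "wordpress_backup",
--     "office_document",
--     "source_code",
--     "document",
--     "archive",
-- ]
--
--
-- def _determine_primary_type(category_counts, detected_projects):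
--     """Single max over the items with a composite key instead of a priority
--     scan followed by a second max."""
--     if detected_projects:
--         return detected_projects[0]
--     if not category_counts:
--         return "unknown"
--     rank = {cat: i for i, cat in enumerate(_PRIORITY_ORDER)}
--
--     def key(item):
--         cat, count = item
--         if cat in rank and count > 0:
--             return (1, -rank[cat])
--         return (0, count)
--
--     return max(category_counts.items(), key=key)[0]
-- ===== Notes on version B (the rewrite author's own statement) =====
-- stated objective: simpler
-- what changed: The explicit scan over the six priority categories followed by a separate max over the counts is replaced by a single max over category_counts.items() with a composite key ((1, -priority_rank) for priority categories with positive count, (0, count) otherwise), so one pass decides both the priority rule and the most-common fallback.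
import Mathlib
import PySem

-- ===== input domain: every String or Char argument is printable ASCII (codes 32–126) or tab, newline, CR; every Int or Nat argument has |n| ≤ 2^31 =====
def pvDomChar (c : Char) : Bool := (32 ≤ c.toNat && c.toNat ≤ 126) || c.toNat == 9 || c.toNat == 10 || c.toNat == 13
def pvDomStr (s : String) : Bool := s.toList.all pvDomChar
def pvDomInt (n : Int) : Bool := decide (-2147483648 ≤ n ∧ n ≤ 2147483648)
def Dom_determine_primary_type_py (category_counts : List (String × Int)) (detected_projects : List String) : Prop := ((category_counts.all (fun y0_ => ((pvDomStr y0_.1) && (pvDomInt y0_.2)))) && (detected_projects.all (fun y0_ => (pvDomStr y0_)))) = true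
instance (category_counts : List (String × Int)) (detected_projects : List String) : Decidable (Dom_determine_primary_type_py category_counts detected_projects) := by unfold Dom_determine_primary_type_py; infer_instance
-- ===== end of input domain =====

-- B replaces A's priority scan plus separate count-max by one max over the items
-- with a composite key; objective: simpler (one pass decides both rules).


-- ===== PORT A =====
def pvPriorityOrder : List String :=
  ["jupyter_notebook", "wordpress_backup", "office_document", "source_code", "document", "archive"]

-- `category in category_counts and category_counts[category] > 0`
def pvPos (d : PySem.Dict String Int) (c : String) : Bool :=
  d.contains c && decide (0 < d.getD c 0)

-- A's loop: `for category in priority_order: if <pvPos>: return category`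
def pvPriorityLoopA (d : PySem.Dict String Int) : List String → Option String
  | [] => none
  | c :: rest => if pvPos d c then some c else pvPriorityLoopA d rest

def determine_primary_type_py (category_counts : List (String × Int)) (detected_projects : List String) : String :=
  match detected_projects with
  | p :: _ => p
  | [] =>
    if category_counts.isEmpty then "unknown"
    else
      match pvPriorityLoopA (PySem.Dict.mk category_counts) pvPriorityOrder with
      | some c => c
      | none =>
        match PySem.List.max? category_counts (fun x => x.2) with
        | some m => m.1
        | none => "unknown"  -- unreachable: category_counts ≠ [] here

-- ===== PORT B =====
-- rank = {cat: i for i, cat in enumerate(_PRIORITY_ORDER)}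
def pvRank : PySem.Dict String Int :=
  (PySem.List.enumerate pvPriorityOrder).foldl (fun d ic => d.insert ic.2 ic.1) PySem.Dict.empty

-- key(item): (1, -rank[cat]) if cat in rank and count > 0 else (0, count)
def pvKeyB (kv : String × Int) : Int × Int :=
  if pvRank.contains kv.1 && decide (0 < kv.2) then (1, -(pvRank.getD kv.1 0))
  else (0, kv.2)

def determine_primary_type_py_alt (category_counts : List (String × Int)) (detected_projects : List String) : String :=
  match detected_projects with
  | p :: _ => p
  | [] =>
    if category_counts.isEmpty then "unknown"
    else
      match PySem.List.max2? category_counts (fun kv => (pvKeyB kv).1) (fun kv => (pvKeyB kv).2) with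
      | some m => m.1
      | none => "unknown"  -- unreachable: category_counts ≠ [] here

-- ===== PRECONDITION & SPEC =====
-- Pre_ excludes association lists whose first components repeat: category_counts is a
-- Python dict, whose representation never carries duplicate keys, so nothing A accepts is excluded.
def Pre_determine_primary_type_py (category_counts : List (String × Int)) (detected_projects : List String) : Prop :=
  (category_counts.map Prod.fst).Nodup
instance (category_counts : List (String × Int)) (detected_projects : List String) : Decidable (Pre_determine_primary_type_py category_counts detected_projects) := by unfold Pre_determine_primary_type_py; infer_instance
def pvWitness_determine_primary_type_py : (List (String × Int)) × List String :=
  ([("source_code", 0), ("notes", 3), ("archive", 1)], [])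

def Spec_determine_primary_type_py (category_counts : List (String × Int)) (detected_projects : List String) (out : String) : Prop := out = determine_primary_type_py_alt category_counts detected_projects
instance (category_counts : List (String × Int)) (detected_projects : List String) (out : String) : Decidable (Spec_determine_primary_type_py category_counts detected_projects out) := by unfold Spec_determine_primary_type_py; infer_instance

-- ===== CLAIM (what is proved, stated in full; the proofs are below) =====
def Claim_equal_determine_primary_type_py : Prop := ∀ (category_counts : List (String × Int)) (detected_projects : List String), Dom_determine_primary_type_py category_counts detected_projects → Pre_determine_primary_type_py category_counts detected_projects → Spec_determine_primary_type_py category_counts detected_projects (determine_primary_type_py category_counts detected_projects)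

-- ===== LEMMAS AND PROOFS =====

-- Python's lexicographic strict order on the (Int × Int) keys, in the form max2?'s step tests.
def pvLtK (a b : Int × Int) : Prop := a.1 < b.1 ∨ (¬ b.1 < a.1 ∧ a.2 < b.2)

lemma pvLtK_irrefl (a : Int × Int) : ¬ pvLtK a a := by
  unfold pvLtK; omega

lemma pvLtK_asymm {a b : Int × Int} (h : pvLtK a b) : ¬ pvLtK b a := by
  unfold pvLtK at *; omega

lemma pvRank_eq : pvRank = PySem.Dict.mk
    [("jupyter_notebook", 0), ("wordpress_backup", 1), ("office_document", 2),
     ("source_code", 3), ("document", 4), ("archive", 5)] := by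
  rfl

-- the rank dict as an if-chain
lemma pvRank_get? (s : String) : pvRank.get? s =
    if s = "jupyter_notebook" then some 0 else
    if s = "wordpress_backup" then some 1 else
    if s = "office_document" then some 2 else
    if s = "source_code" then some 3 else
    if s = "document" then some 4 else
    if s = "archive" then some 5 else none := by
  simp only [pvRank_eq, PySem.Dict.get?_mk_cons]
  have h : ∀ (a : String), (a == s) = decide (s = a) := by
    intro a; by_cases h : s = a <;> simp [h, Ne.symm]
  simp only [h]
  split_ifs <;> simp_all [PySem.Dict.get?]

-- A's loop is find? over the priority list
lemma pvLoopA_eq_find? (d : PySem.Dict String Int) (P : List String) :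
    pvPriorityLoopA d P = P.find? (fun c => pvPos d c) := by
  induction P with
  | nil => rfl
  | cons c rest ih =>
    simp only [pvPriorityLoopA, List.find?]
    by_cases h : pvPos d c = true
    · simp [h]
    · simp [h, ih]

-- the step of max2?'s fold moves exactly on pvLtK
lemma pvCond_iff (w x : Int × Int) :
    (decide (w.1 < x.1) || !decide (x.1 < w.1) && decide (w.2 < x.2)) = true ↔ pvLtK w x := by
  simp [pvLtK]

-- a current maximum that nothing later beats survives the fold
lemma pvFold_keep {α : Type} (k1 k2 : α → Int) (xs : List α) (m : α)
    (h : ∀ y ∈ xs, ¬ pvLtK (k1 m, k2 m) (k1 y, k2 y)) :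
    xs.foldl (fun acc x =>
      match acc with
      | none => some x
      | some w =>
        if (decide (k1 w < k1 x) || !decide (k1 x < k1 w) && decide (k2 w < k2 x)) = true then some x else some w)
      (some m) = some m := by
  induction xs with
  | nil => rfl
  | cons y t ih =>
    have hy := h y (by simp)
    have hcond : (decide (k1 m < k1 y) || !decide (k1 y < k1 m) && decide (k2 m < k2 y)) = false := by
      rw [← Bool.not_eq_true]
      intro hc
      exact hy ((pvCond_iff (k1 m, k2 m) (k1 y, k2 y)).mp hc)
    simp only [List.foldl_cons, hcond]
    exact ih (fun y hy => h y (by simp [hy]))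

lemma pvFold_reach {α : Type} (k1 k2 : α → Int) (xs : List α) (m : α) (acc : Option α)
    (hacc : acc = none ∨ ∃ a, acc = some a ∧ pvLtK (k1 a, k2 a) (k1 m, k2 m))
    (hm : m ∈ xs)
    (h : ∀ y ∈ xs, y ≠ m → pvLtK (k1 y, k2 y) (k1 m, k2 m)) :
    xs.foldl (fun acc x =>
      match acc with
      | none => some x
      | some w =>
        if (decide (k1 w < k1 x) || !decide (k1 x < k1 w) && decide (k2 w < k2 x)) = true then some x else some w)
      acc = some m := by
  induction xs generalizing acc with
  | nil => cases hm
  | cons x t ih =>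
    simp only [List.foldl_cons]
    by_cases hxm : x = m
    · subst hxm
      have hkeep : ∀ y ∈ t, ¬ pvLtK (k1 x, k2 x) (k1 y, k2 y) := by
        intro y hy
        by_cases hym : y = x
        · subst hym; exact pvLtK_irrefl _
        · exact pvLtK_asymm (h y (by simp [hy]) hym)
      rcases hacc with h0 | ⟨a, ha, hlt⟩
      · subst h0
        exact pvFold_keep k1 k2 t x hkeep
      · subst ha
        simp only []
        rw [show (if (decide (k1 a < k1 x) || !decide (k1 x < k1 a) && decide (k2 a < k2 x)) = true
            then some x else some a) = some x from by
          rw [if_pos ((pvCond_iff (k1 a, k2 a) (k1 x, k2 x)).mpr hlt)]]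
        exact pvFold_keep k1 k2 t x hkeep
    · have hxlt : pvLtK (k1 x, k2 x) (k1 m, k2 m) := h x (by simp) hxm
      have hm' : m ∈ t := by
        rcases List.mem_cons.mp hm with h' | h'
        · exact absurd h'.symm hxm
        · exact h'
      have ht : ∀ y ∈ t, y ≠ m → pvLtK (k1 y, k2 y) (k1 m, k2 m) :=
        fun y hy hne => h y (by simp [hy]) hne
      rcases hacc with h0 | ⟨a, ha, hlt⟩
      · subst h0
        exact ih (some x) (Or.inr ⟨x, rfl, hxlt⟩) hm' ht
      · subst ha
        simp only []
        by_cases hc : (decide (k1 a < k1 x) || !decide (k1 x < k1 a) && decide (k2 a < k2 x)) = true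
        · rw [show (if (decide (k1 a < k1 x) || !decide (k1 x < k1 a) && decide (k2 a < k2 x)) = true
              then some x else some a) = some x from by rw [if_pos hc]]
          exact ih (some x) (Or.inr ⟨x, rfl, hxlt⟩) hm' ht
        · rw [show (if (decide (k1 a < k1 x) || !decide (k1 x < k1 a) && decide (k2 a < k2 x)) = true
              then some x else some a) = some a from by rw [if_neg hc]]
          exact ih (some a) (Or.inr ⟨a, rfl, hlt⟩) hm' ht

-- max2? returns the unique strict maximum
lemma pvMax2?_eq_of_strict {α : Type} (k1 k2 : α → Int) (xs : List α) (m : α)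
    (hm : m ∈ xs) (h : ∀ y ∈ xs, y ≠ m → pvLtK (k1 y, k2 y) (k1 m, k2 m)) :
    PySem.List.max2? xs k1 k2 = some m := by
  unfold PySem.List.max2?
  exact pvFold_reach k1 k2 xs m none (Or.inl rfl) hm h

-- when every first key component is 0 and the second is the count, max2? is A's max?
-- fold congruence under an invariant on the accumulator (step functions stay parameters,
-- so they unify syntactically with the unfolded max2?/max?)
lemma pvFoldl_eq_of_inv {α : Type} (f g : Option α → α → Option α) (Q : α → Prop)
    (hstep : ∀ w x, (∀ a, w = some a → Q a) → Q x →
        f w x = g w x ∧ (∀ a, f w x = some a → Q a)) :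
    ∀ (xs : List α) (acc : Option α), (∀ a, acc = some a → Q a) → (∀ y ∈ xs, Q y) →
      xs.foldl f acc = xs.foldl g acc := by
  intro xs
  induction xs with
  | nil => intros; rfl
  | cons x t ih =>
    intro acc hacc h
    obtain ⟨heq, hinv⟩ := hstep acc x hacc (h x (by simp))
    simp only [List.foldl_cons]
    rw [← heq]
    exact ih (f acc x) hinv (fun y hy => h y (by simp [hy]))

-- when every first key component is 0 and the second is the count, max2? is A's max?
lemma pvMax2?_eq_max? (xs : List (String × Int))
    (h : ∀ y ∈ xs, (pvKeyB y).1 = 0 ∧ (pvKeyB y).2 = y.2) :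
    PySem.List.max2? xs (fun kv => (pvKeyB kv).1) (fun kv => (pvKeyB kv).2)
      = PySem.List.max? xs (fun x => x.2) := by
  unfold PySem.List.max2? PySem.List.max?
  refine pvFoldl_eq_of_inv _ _ (fun y => (pvKeyB y).1 = 0 ∧ (pvKeyB y).2 = y.2)
    ?_ xs none (by simp) h
  intro w x hw hx
  cases w with
  | none => exact ⟨rfl, by intro a ha; simp only [] at ha; simp at ha; subst ha; exact hx⟩
  | some w' =>
    obtain ⟨h1, h2⟩ := hw w' rfl
    simp only []
    by_cases hlt : w'.2 < x.2
    · constructor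
      · rw [if_pos, if_pos hlt]
        simp [h1, h2, hx.1, hx.2, hlt]
      · intro a ha
        rw [if_pos] at ha
        · simp at ha; subst ha; exact hx
        · simp [h1, h2, hx.1, hx.2, hlt]
    · constructor
      · rw [if_neg, if_neg hlt]
        simp [h1, h2, hx.1, hx.2, hlt]
      · intro a ha
        rw [if_neg] at ha
        · simp at ha; subst ha; exact ⟨h1, h2⟩
        · simp [h1, h2, hx.1, hx.2, hlt]

-- membership in a nodup-keyed dict gives the lookups
lemma pvMem_lookup (cc : List (String × Int)) (hnd : (cc.map Prod.fst).Nodup)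
    {y : String × Int} (hy : y ∈ cc) :
    (PySem.Dict.mk cc).get? y.1 = some y.2 := by
  have hk : (PySem.Dict.mk cc).keys.Nodup := by
    rw [PySem.Dict.keys_mk]; exact hnd
  exact PySem.Dict.get?_of_mem_items _ (by exact hy) hk

lemma pvMem_pos (cc : List (String × Int)) (hnd : (cc.map Prod.fst).Nodup)
    {y : String × Int} (hy : y ∈ cc) (hpos : 0 < y.2) :
    pvPos (PySem.Dict.mk cc) y.1 = true := by
  have hg := pvMem_lookup cc hnd hy
  unfold pvPos
  rw [PySem.Dict.contains_eq_isSome_get?, hg,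
    PySem.Dict.getD_of_get?_eq_some _ 0 hg]
  simpa using hpos

-- the core of case 1: the first priority category with positive count wins B's max
lemma pvCase1 (cc : List (String × Int)) (hnd : (cc.map Prod.fst).Nodup)
    (c : String) (k : Int)
    (hrk : pvRank.get? c = some k)
    (hpos : pvPos (PySem.Dict.mk cc) c = true)
    (hmax : ∀ s r, pvRank.get? s = some r → s ≠ c →
        pvPos (PySem.Dict.mk cc) s = true → k < r) :
    (match PySem.List.max2? cc (fun kv => (pvKeyB kv).1) (fun kv => (pvKeyB kv).2) with
      | some m => m.1
      | none => "unknown") = c := by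
  unfold pvPos at hpos
  rw [Bool.and_eq_true, PySem.Dict.contains_eq_isSome_get?] at hpos
  obtain ⟨hsome, hgt⟩ := hpos
  obtain ⟨v, hv⟩ := Option.isSome_iff_exists.mp hsome
  have hvpos : 0 < v := by
    rw [PySem.Dict.getD_of_get?_eq_some _ 0 hv] at hgt
    simpa using hgt
  have hmem : (c, v) ∈ cc := PySem.Dict.mem_items_of_get?_eq_some _ hv
  have hkeym : pvKeyB (c, v) = (1, -k) := by
    unfold pvKeyB
    rw [PySem.Dict.contains_eq_isSome_get?, hrk,
      PySem.Dict.getD_of_get?_eq_some _ 0 hrk]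
    simp [hvpos]
  rw [pvMax2?_eq_of_strict _ _ cc (c, v) hmem ?_]
  · intro y hy hne
    rw [hkeym]
    by_cases hc : (pvRank.contains y.1 && decide (0 < y.2)) = true
    · rw [Bool.and_eq_true, PySem.Dict.contains_eq_isSome_get?] at hc
      obtain ⟨hsome', hpos'⟩ := hc
      obtain ⟨r, hr⟩ := Option.isSome_iff_exists.mp hsome'
      have hy2 : 0 < y.2 := by simpa using hpos'
      have hkey : pvKeyB y = (1, -r) := by
        unfold pvKeyB
        rw [PySem.Dict.contains_eq_isSome_get?, hr,
          PySem.Dict.getD_of_get?_eq_some _ 0 hr]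
        simp [hy2]
      rw [hkey]
      have hne' : y.1 ≠ c := by
        intro heq
        have : (PySem.Dict.mk cc).get? y.1 = some y.2 := pvMem_lookup cc hnd hy
        rw [heq, hv] at this
        exact hne (by rw [Prod.ext_iff]; exact ⟨heq, (Option.some_injective _ this).symm⟩)
      have hkr : k < r := hmax y.1 r hr hne' (pvMem_pos cc hnd hy hy2)
      right
      constructor <;> simp <;> omega
    · have hkey : pvKeyB y = (0, y.2) := by
        unfold pvKeyB; rw [if_neg hc]
      rw [hkey]
      left; simp

-- the core equality for a non-empty dict, by cases on A's priority scan
lemma pvCore (cc : List (String × Int)) (hnd : (cc.map Prod.fst).Nodup) :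
    (match pvPriorityLoopA (PySem.Dict.mk cc) pvPriorityOrder with
      | some c => c
      | none =>
        match PySem.List.max? cc (fun x => x.2) with
        | some m => m.1
        | none => "unknown")
    = (match PySem.List.max2? cc (fun kv => (pvKeyB kv).1) (fun kv => (pvKeyB kv).2) with
      | some m => m.1
      | none => "unknown") := by
  rw [pvLoopA_eq_find?]
  simp only [pvPriorityOrder]
  by_cases h1 : pvPos (PySem.Dict.mk cc) "jupyter_notebook" = true
  · rw [List.find?_cons_of_pos h1]
    refine (pvCase1 cc hnd "jupyter_notebook" 0 (by rw [pvRank_get?]; rfl) h1 ?_).symm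
    intro s r hs hne hp
    rw [pvRank_get?] at hs
    split_ifs at hs
    all_goals first
      | (subst_vars; exact absurd rfl hne)
      | (injection hs with h'; omega)
      | exact Option.noConfusion hs
  · rw [List.find?_cons_of_neg h1]
    by_cases h2 : pvPos (PySem.Dict.mk cc) "wordpress_backup" = true
    · rw [List.find?_cons_of_pos h2]
      refine (pvCase1 cc hnd "wordpress_backup" 1 (by rw [pvRank_get?]; rfl) h2 ?_).symm
      intro s r hs hne hp
      rw [pvRank_get?] at hs
      split_ifs at hs
      all_goals first
        | (subst_vars; exact absurd rfl hne)
        | (subst_vars; exact absurd hp h1)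
        | (injection hs with h'; omega)
        | exact Option.noConfusion hs
    · rw [List.find?_cons_of_neg h2]
      by_cases h3 : pvPos (PySem.Dict.mk cc) "office_document" = true
      · rw [List.find?_cons_of_pos h3]
        refine (pvCase1 cc hnd "office_document" 2 (by rw [pvRank_get?]; rfl) h3 ?_).symm
        intro s r hs hne hp
        rw [pvRank_get?] at hs
        split_ifs at hs
        all_goals first
          | (subst_vars; exact absurd rfl hne)
          | (subst_vars; exact absurd hp h1)
          | (subst_vars; exact absurd hp h2)
          | (injection hs with h'; omega)
          | exact Option.noConfusion hs
      · rw [List.find?_cons_of_neg h3]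
        by_cases h4 : pvPos (PySem.Dict.mk cc) "source_code" = true
        · rw [List.find?_cons_of_pos h4]
          refine (pvCase1 cc hnd "source_code" 3 (by rw [pvRank_get?]; rfl) h4 ?_).symm
          intro s r hs hne hp
          rw [pvRank_get?] at hs
          split_ifs at hs
          all_goals first
            | (subst_vars; exact absurd rfl hne)
            | (subst_vars; exact absurd hp h1)
            | (subst_vars; exact absurd hp h2)
            | (subst_vars; exact absurd hp h3)
            | (injection hs with h'; omega)
            | exact Option.noConfusion hs
        · rw [List.find?_cons_of_neg h4]
          by_cases h5 : pvPos (PySem.Dict.mk cc) "document" = true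
          · rw [List.find?_cons_of_pos h5]
            refine (pvCase1 cc hnd "document" 4 (by rw [pvRank_get?]; rfl) h5 ?_).symm
            intro s r hs hne hp
            rw [pvRank_get?] at hs
            split_ifs at hs
            all_goals first
              | (subst_vars; exact absurd rfl hne)
              | (subst_vars; exact absurd hp h1)
              | (subst_vars; exact absurd hp h2)
              | (subst_vars; exact absurd hp h3)
              | (subst_vars; exact absurd hp h4)
              | (injection hs with h'; omega)
              | exact Option.noConfusion hs
          · rw [List.find?_cons_of_neg h5]
            by_cases h6 : pvPos (PySem.Dict.mk cc) "archive" = true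
            · rw [List.find?_cons_of_pos h6]
              refine (pvCase1 cc hnd "archive" 5 (by rw [pvRank_get?]; rfl) h6 ?_).symm
              intro s r hs hne hp
              rw [pvRank_get?] at hs
              split_ifs at hs
              all_goals first
                | (subst_vars; exact absurd rfl hne)
                | (subst_vars; exact absurd hp h1)
                | (subst_vars; exact absurd hp h2)
                | (subst_vars; exact absurd hp h3)
                | (subst_vars; exact absurd hp h4)
                | (subst_vars; exact absurd hp h5)
                | (injection hs with h'; omega)
                | exact Option.noConfusion hs
            · rw [List.find?_cons_of_neg h6]
              rw [List.find?_nil]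
              rw [pvMax2?_eq_max? cc ?_]
              intro y hy
              by_cases hc : (pvRank.contains y.1 && decide (0 < y.2)) = true
              · exfalso
                rw [Bool.and_eq_true, PySem.Dict.contains_eq_isSome_get?] at hc
                obtain ⟨hsome', hpos'⟩ := hc
                obtain ⟨r, hr⟩ := Option.isSome_iff_exists.mp hsome'
                have hy2 : 0 < y.2 := by simpa using hpos'
                have hp : pvPos (PySem.Dict.mk cc) y.1 = true := pvMem_pos cc hnd hy hy2
                rw [pvRank_get?] at hr
                split_ifs at hr
                all_goals first
                  | exact Option.noConfusion hr
                  | (rename_i hsy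
                     rw [hsy] at hp
                     first
                       | exact h1 hp | exact h2 hp | exact h3 hp
                       | exact h4 hp | exact h5 hp | exact h6 hp)
              · unfold pvKeyB
                rw [if_neg hc]
                exact ⟨rfl, rfl⟩

-- ===== VERDICT (by name: the statement is the Claim_ definition above) =====
theorem determine_primary_type_py_spec : Claim_equal_determine_primary_type_py := by
  intro cc dp _ hpre
  unfold Spec_determine_primary_type_py
  unfold Pre_determine_primary_type_py at hpre
  cases dp with
  | cons p t => rfl
  | nil =>
    cases cc with
    | nil => rfl
    | cons z cs =>
      simp only [determine_primary_type_py, determine_primary_type_py_alt, List.isEmpty_cons,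
        Bool.false_eq_true, if_false]
      exact pvCore (z :: cs) hpre
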